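-- pv_equiv track=rewrite | github.com/Jesemeil/PythonProjects | student_grade.py | findEasiestSubject
-- ===== SOURCE A (Python) =====
-- def findEasiestSubject(scores, numStudents, numSubjects):
--     easiestSubject = -1
--     mostPasses = -1
--
--     for sub in range(numSubjects):
--         numPasses = countPasses(scores, numStudents, numSubjects, sub)
--         if numPasses > mostPasses:
--             easiestSubject = sub
--             mostPasses = numPasses
--
--     return easiestSubject
--
-- def countPasses(scores, numStudents, numSubjects, subjectIndex):
--     numPasses = 0
--     for i in range(numStudents):
--         if scores[i][subjectIndex] >= 50:
--             numPasses += 1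
--     return numPasses
-- ===== SOURCE B (Python) =====
-- def findEasiestSubject(scores, numStudents, numSubjects):
--     # Build a per-subject pass-count table in one row-major pass, then argmax.
--     counts = [0] * numSubjects
--     for i, row in enumerate(scores):
--         if i >= numStudents:
--             break
--         counts = [c + (1 if s >= 50 else 0) for c, s in zip(counts, row)]
--     best, bestCount = -1, -1
--     for sub, c in enumerate(counts):
--         if c > bestCount:
--             best, bestCount = sub, c
--     return best
-- ===== Notes on version B (the rewrite author's own statement) =====
-- stated objective: alternative
-- what changed: A scans column-by-column, re-walking all students once per subject via countPasses; B makes one row-major pass building a per-subject pass-count table (zipping the counts with each row) and then argmaxes that table with enumerate.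
import Mathlib
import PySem

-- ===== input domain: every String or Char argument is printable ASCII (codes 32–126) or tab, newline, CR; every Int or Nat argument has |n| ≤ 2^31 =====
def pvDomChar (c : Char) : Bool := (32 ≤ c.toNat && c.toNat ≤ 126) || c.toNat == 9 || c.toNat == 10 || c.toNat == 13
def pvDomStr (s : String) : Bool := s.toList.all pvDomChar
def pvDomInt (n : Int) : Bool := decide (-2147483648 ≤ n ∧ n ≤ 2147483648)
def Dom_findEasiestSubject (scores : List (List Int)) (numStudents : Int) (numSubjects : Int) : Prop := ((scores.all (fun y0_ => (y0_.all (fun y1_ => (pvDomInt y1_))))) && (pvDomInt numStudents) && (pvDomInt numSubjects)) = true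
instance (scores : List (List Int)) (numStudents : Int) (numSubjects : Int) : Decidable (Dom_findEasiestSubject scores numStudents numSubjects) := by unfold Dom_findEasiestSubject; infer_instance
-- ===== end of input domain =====

-- B replaces A's column-by-column scan (one pass over all students per subject) by a single
-- row-major pass building a per-subject pass-count table, then an argmax over that table
-- (objective: alternative decomposition, same asymptotic cost).

-- ===== PORT A =====
def pvCountPasses (scores : List (List Int)) (numStudents : Int) (subjectIndex : Int) : Int :=
  (PySem.List.pyRange 0 numStudents 1).foldl
    (fun numPasses i =>
      if PySem.List.pyGetD (PySem.List.pyGetD scores i []) subjectIndex 0 ≥ 50 then numPasses + 1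
      else numPasses) 0

def findEasiestSubject (scores : List (List Int)) (numStudents : Int) (numSubjects : Int) : Int :=
  ((PySem.List.pyRange 0 numSubjects 1).foldl
    (fun st sub =>
      let numPasses := pvCountPasses scores numStudents sub
      if numPasses > st.2 then (sub, numPasses) else st)
    ((-1 : Int), (-1 : Int))).1

-- ===== PORT B =====
-- 'for i, row in enumerate(scores): if i >= numStudents: break; counts = [...]'
-- ported as structural recursion on the rows carrying the running index and table.
def pvFillCounts (rows : List (List Int)) (i : Int) (numStudents : Int) (counts : List Int) : List Int :=
  match rows with
  | [] => counts
  | row :: rest =>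
    if i ≥ numStudents then counts
    else pvFillCounts rest (i + 1) numStudents
      ((counts.zip row).map (fun p => p.1 + if p.2 ≥ 50 then 1 else 0))

def findEasiestSubject_alt (scores : List (List Int)) (numStudents : Int) (numSubjects : Int) : Int :=
  ((PySem.List.enumerate
      (pvFillCounts scores 0 numStudents (List.replicate numSubjects.toNat 0))).foldl
    (fun st p => if p.2 > st.2 then (p.1, p.2) else st) ((-1 : Int), (-1 : Int))).1

-- ===== PRECONDITION & SPEC =====
-- Pre_ excludes exactly the inputs on which A raises IndexError: when both counts are positive,
-- numStudents exceeding the number of rows, or a scanned row shorter than numSubjects.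
def Pre_findEasiestSubject (scores : List (List Int)) (numStudents : Int) (numSubjects : Int) : Prop :=
  0 < numSubjects → numStudents ≤ (scores.length : Int) ∧
    ∀ row ∈ scores.take numStudents.toNat, numSubjects ≤ (row.length : Int)
instance (scores : List (List Int)) (numStudents : Int) (numSubjects : Int) : Decidable (Pre_findEasiestSubject scores numStudents numSubjects) := by unfold Pre_findEasiestSubject; infer_instance

def pvWitness_findEasiestSubject : List (List Int) × Int × Int := ([[60, 40], [55, 55]], 2, 2)

def Spec_findEasiestSubject (scores : List (List Int)) (numStudents : Int) (numSubjects : Int) (out : Int) : Prop := out = findEasiestSubject_alt scores numStudents numSubjects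
instance (scores : List (List Int)) (numStudents : Int) (numSubjects : Int) (out : Int) : Decidable (Spec_findEasiestSubject scores numStudents numSubjects out) := by unfold Spec_findEasiestSubject; infer_instance

-- ===== CLAIM (what is proved, stated in full; the proofs are below) =====
def Claim_equal_findEasiestSubject : Prop := ∀ (scores : List (List Int)) (numStudents : Int) (numSubjects : Int), Dom_findEasiestSubject scores numStudents numSubjects → Pre_findEasiestSubject scores numStudents numSubjects → Spec_findEasiestSubject scores numStudents numSubjects (findEasiestSubject scores numStudents numSubjects)

-- ===== LEMMAS AND PROOFS =====

-- One step of B's table update.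
lemma pv_step_len (cs row : List Int) (h : cs.length ≤ row.length) :
    ((cs.zip row).map (fun p => p.1 + if p.2 ≥ 50 then 1 else 0)).length = cs.length := by
  simp [List.length_zip]; omega

-- B's break-at-numStudents loop is the fold over the first numStudents rows.
lemma pv_fill_eq_foldl_take (rows : List (List Int)) (i numStudents : Int) (cs : List Int) :
    pvFillCounts rows i numStudents cs
      = (rows.take (numStudents - i).toNat).foldl
          (fun cs row => (cs.zip row).map (fun p => p.1 + if p.2 ≥ 50 then 1 else 0)) cs := by
  induction rows generalizing i cs with
  | nil => simp [pvFillCounts]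
  | cons row rest ih =>
    unfold pvFillCounts
    by_cases hge : i ≥ numStudents
    · have : (numStudents - i).toNat = 0 := by omega
      simp [hge, this]
    · have h1 : (numStudents - i).toNat = (numStudents - (i + 1)).toNat + 1 := by omega
      simp only [hge, if_false, h1, List.take_succ_cons, List.foldl_cons]
      exact ih (i + 1) _

-- B's table fold starting from the empty table stays empty.
lemma pv_counts_nil (rows : List (List Int)) :
    rows.foldl (fun cs row => (cs.zip row).map (fun p => p.1 + if p.2 ≥ 50 then 1 else 0)) ([] : List Int) = [] := by
  induction rows with
  | nil => rfl
  | cons r rs ih => simpa using ih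

-- Characterisation of B's table: length preserved, entry j counts the passing rows at column j.
lemma pv_counts_spec (rows : List (List Int)) (cs : List Int)
    (h : ∀ row ∈ rows, cs.length ≤ row.length) :
    (rows.foldl (fun cs row => (cs.zip row).map (fun p => p.1 + if p.2 ≥ 50 then 1 else 0)) cs).length = cs.length ∧
    ∀ j : Nat, j < cs.length →
      (rows.foldl (fun cs row => (cs.zip row).map (fun p => p.1 + if p.2 ≥ 50 then 1 else 0)) cs).getD j 0
        = cs.getD j 0 + ((rows.countP (fun row => decide (row.getD j 0 ≥ 50))) : Int) := by
  induction rows generalizing cs with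
  | nil => simp
  | cons r rs ih =>
    have hr : cs.length ≤ r.length := h r (by simp)
    have hlen := pv_step_len cs r hr
    have hrest : ∀ row ∈ rs, ((cs.zip r).map (fun p => p.1 + if p.2 ≥ 50 then 1 else 0)).length ≤ row.length := by
      intro row hrow; rw [hlen]; exact h row (by simp [hrow])
    obtain ⟨ih1, ih2⟩ := ih _ hrest
    constructor
    · simpa [hlen] using ih1
    · intro j hj
      have hj' : j < ((cs.zip r).map (fun p => p.1 + if p.2 ≥ 50 then 1 else 0)).length := by omega
      have hstep : ((cs.zip r).map (fun p => p.1 + if p.2 ≥ 50 then 1 else 0)).getD j 0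
          = cs.getD j 0 + (if r.getD j 0 ≥ 50 then 1 else 0) := by
        have hjz : j < (cs.zip r).length := by simp [List.length_zip]; omega
        rw [List.getD_eq_getElem _ _ hj', List.getElem_map, List.getElem_zip,
            List.getD_eq_getElem _ _ hj, List.getD_eq_getElem _ _ (by omega : j < r.length)]
      have := ih2 j (by omega)
      rw [List.foldl_cons, this, hstep, List.countP_cons]
      simp only [decide_eq_true_eq]
      split_ifs <;> push_cast <;> omega

-- A's countPasses equals a countP over the first m rows.
lemma pv_countPasses_eq (scores : List (List Int)) (sub : Int) (hsub : 0 ≤ sub)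
    (m : Nat) (hm : m ≤ scores.length)
    (hrows : ∀ row ∈ scores.take m, sub < (row.length : Int)) :
    pvCountPasses scores (m : Int) sub
      = (((scores.take m).countP (fun row => decide (row.getD sub.toNat 0 ≥ 50))) : Int) := by
  induction m with
  | zero => simp [pvCountPasses, PySem.List.pyRange_one_eq_nil]
  | succ k ih =>
    have hk : k ≤ scores.length := by omega
    have hkin : k < scores.length := by omega
    have htake : scores.take (k + 1) = scores.take k ++ [scores[k]] := by
      rw [List.take_add_one]; simp [List.getElem?_eq_getElem hkin]
    have hmemk : scores[k] ∈ scores.take (k + 1) := by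
      rw [htake]; exact List.mem_append_right _ (List.mem_singleton_self _)
    have hrows' : ∀ row ∈ scores.take k, sub < (row.length : Int) := by
      intro row hrow
      exact hrows row (by rw [htake]; exact List.mem_append_left _ hrow)
    have ihk := ih hk hrows'
    have hcast : ((k + 1 : Nat) : Int) = (k : Int) + 1 := by push_cast; ring
    have hrange : PySem.List.pyRange 0 ((k + 1 : Nat) : Int) 1
        = PySem.List.pyRange 0 (k : Int) 1 ++ [(k : Int)] := by
      rw [hcast]; exact PySem.List.pyRange_one_succ_right (by positivity)
    have hrowk : sub < (scores[k].length : Int) := hrows _ hmemk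
    have hget1 : PySem.List.pyGetD scores ((k : Nat) : Int) [] = scores[k] := by
      rw [PySem.List.pyGetD_eq_getElem scores [] (by positivity) (by exact_mod_cast hkin)]
      simp
    have hget2 : PySem.List.pyGetD scores[k] sub 0 = scores[k].getD sub.toNat 0 := by
      rw [PySem.List.pyGetD_eq_getElem scores[k] 0 hsub hrowk,
          List.getD_eq_getElem _ _ (by omega : sub.toNat < scores[k].length)]
    unfold pvCountPasses at ihk ⊢
    rw [hrange, List.foldl_append, ihk, htake, List.countP_append]
    simp only [List.foldl_cons, List.foldl_nil, hget1, hget2, List.countP_cons, List.countP_nil]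
    push_cast
    simp only [decide_eq_true_eq]
    split_ifs <;> omega

-- The two argmax scans agree once the table entry at each subject equals countPasses.
lemma pv_argmax_eq (scores : List (List Int)) (numStudents numSubjects : Int) (counts : List Int)
    (hclen : (counts.length : Int) = numSubjects)
    (hcvals : ∀ sub : Int, 0 ≤ sub → sub < numSubjects →
      PySem.List.pyGetD counts sub 0 = pvCountPasses scores numStudents sub) :
    ((PySem.List.pyRange 0 numSubjects 1).foldl
      (fun st sub =>
        let numPasses := pvCountPasses scores numStudents sub
        if numPasses > st.2 then (sub, numPasses) else st)
      ((-1 : Int), (-1 : Int))).1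
    = ((PySem.List.enumerate counts).foldl
      (fun st p => if p.2 > st.2 then (p.1, p.2) else st) ((-1 : Int), (-1 : Int))).1 := by
  rw [PySem.List.enumerate_eq_map_pyRange counts 0, List.foldl_map]
  have hlen' : PySem.List.len counts = numSubjects := by
    simpa [PySem.List.len] using hclen
  rw [hlen']
  congr 1
  apply PySem.List.foldl_congr_mem'
  intro sub hmem st
  have hb := (PySem.List.mem_pyRange_one).1 hmem
  simp only [hcvals sub hb.1 hb.2]

-- ===== VERDICT (by name: the statement is the Claim_ definition above) =====
theorem findEasiestSubject_spec : Claim_equal_findEasiestSubject := by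
  intro scores numStudents numSubjects _ hpre
  unfold Spec_findEasiestSubject findEasiestSubject findEasiestSubject_alt
  rw [pv_fill_eq_foldl_take, show numStudents - 0 = numStudents from by ring]
  by_cases hpos : 0 < numSubjects
  · obtain ⟨hlen, hrows⟩ := hpre hpos
    have hrows' : ∀ row ∈ scores.take numStudents.toNat,
        (List.replicate numSubjects.toNat (0 : Int)).length ≤ row.length := by
      intro row hrow
      have := hrows row hrow
      simp
      omega
    obtain ⟨hclen, hcget⟩ := pv_counts_spec (scores.take numStudents.toNat)
      (List.replicate numSubjects.toNat 0) hrows'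
    rw [List.length_replicate] at hclen
    apply pv_argmax_eq
    · omega
    · intro sub hsub0 hsubn
      have hsubnat : sub.toNat < numSubjects.toNat := by omega
      have hlt : sub < (((scores.take numStudents.toNat).foldl
            (fun cs row => (cs.zip row).map (fun p => p.1 + if p.2 ≥ 50 then 1 else 0))
            (List.replicate numSubjects.toNat 0 : List Int)).length : Int) := by omega
      have hltn : sub.toNat < ((scores.take numStudents.toNat).foldl
            (fun cs row => (cs.zip row).map (fun p => p.1 + if p.2 ≥ 50 then 1 else 0))
            (List.replicate numSubjects.toNat 0 : List Int)).length := by omega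
      have hget : PySem.List.pyGetD
          ((scores.take numStudents.toNat).foldl
            (fun cs row => (cs.zip row).map (fun p => p.1 + if p.2 ≥ 50 then 1 else 0))
            (List.replicate numSubjects.toNat 0 : List Int)) sub 0
          = ((scores.take numStudents.toNat).foldl
            (fun cs row => (cs.zip row).map (fun p => p.1 + if p.2 ≥ 50 then 1 else 0))
            (List.replicate numSubjects.toNat 0 : List Int)).getD sub.toNat 0 := by
        rw [PySem.List.pyGetD_eq_getElem _ 0 hsub0 hlt,
            List.getD_eq_getElem _ _ hltn]
      rw [hget, hcget sub.toNat (by simpa using hsubnat)]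
      have hrows'' : ∀ row ∈ scores.take numStudents.toNat, sub < (row.length : Int) := by
        intro row hrow; have := hrows row hrow; omega
      by_cases hns : 0 ≤ numStudents
      · have hmi : ((numStudents.toNat : Nat) : Int) = numStudents := Int.toNat_of_nonneg hns
        rw [← hmi, pv_countPasses_eq scores sub hsub0 numStudents.toNat (by omega) hrows'']
        simp
        rw [show (max numStudents 0).toNat = numStudents.toNat from by omega]
      · -- numStudents < 0: A's inner range is empty and B scans no rows
        have h0 : numStudents.toNat = 0 := by omega
        rw [h0]
        unfold pvCountPasses
        rw [PySem.List.pyRange_one_eq_nil (by omega : numStudents ≤ 0)]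
        simp
  · -- numSubjects ≤ 0: both sides return -1
    have h0 : numSubjects.toNat = 0 := by omega
    rw [PySem.List.pyRange_one_eq_nil (by omega : numSubjects ≤ 0),
        show (List.replicate numSubjects.toNat (0 : Int)) = [] from by simp [h0],
        pv_counts_nil]
    simp [PySem.List.enumerate]
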